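-- pv_equiv track=rewrite | github.com/agmonetti/TPOJuego2048 | TPO_2048.py | mov_arr
-- ===== SOURCE A (Python) =====
-- def mov_arr(mat):
--     '''Realiza todos los movimientos posibles hacia arriba en la matriz,
--  y devuelve la suma de puntos obtenidos con dicho movimiento'''
--
--     puntos = 0
--     for i in range(len(mat[0])):
--         sumados = []
--         for j in range(1,len(mat)):
--             if mat[j][i] == 0:
--                 continue
--             for k in range(j,0,-1):
--                 if mat[k][i] == mat[k-1][i] and k not in sumados and k-1 not in sumados:
--                     mat[k-1][i] += mat[k][i]
--                     mat[k][i] = 0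
--                     sumados.append(k-1)
--                     puntos += mat[k-1][i]
--                 elif mat[k-1][i] == 0:
--                     mat[k-1][i] = mat[k][i]
--                     mat[k][i] = 0
--                     if k in sumados:
--                         sumados[-1] += -1
--                 else:
--                     break
--
--     return puntos
-- ===== SOURCE B (Python) =====
-- def mov_arr(mat):
--     '''Points gained by a full move-up on mat. Note: unlike the original,
--     this does not mutate mat; the equivalence claimed is about the return
--     value only.'''
--     puntos = 0
--     for i in range(len(mat[0])):
--         col = [row[i] for row in mat if row[i] != 0]
--         t = 0
--         while t + 1 < len(col):
--             if col[t] == col[t + 1]: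
--                 puntos += 2 * col[t]
--                 t += 2
--             else:
--                 t += 1
--     return puntos
-- ===== Notes on version B (the rewrite author's own statement) =====
-- stated objective: faster
-- what changed: Instead of bubbling each tile upward with a nested k-loop over the mutable matrix plus a 'sumados' merge-mark list, B extracts each column, compacts the nonzeros, and does one left-to-right pass merging adjacent equal pairs while accumulating points; B does not mutate mat (return value equivalence only).
-- outside the precondition, e.g. on mov_arr([]): A raises IndexError, B raises IndexError
import Mathlib
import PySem

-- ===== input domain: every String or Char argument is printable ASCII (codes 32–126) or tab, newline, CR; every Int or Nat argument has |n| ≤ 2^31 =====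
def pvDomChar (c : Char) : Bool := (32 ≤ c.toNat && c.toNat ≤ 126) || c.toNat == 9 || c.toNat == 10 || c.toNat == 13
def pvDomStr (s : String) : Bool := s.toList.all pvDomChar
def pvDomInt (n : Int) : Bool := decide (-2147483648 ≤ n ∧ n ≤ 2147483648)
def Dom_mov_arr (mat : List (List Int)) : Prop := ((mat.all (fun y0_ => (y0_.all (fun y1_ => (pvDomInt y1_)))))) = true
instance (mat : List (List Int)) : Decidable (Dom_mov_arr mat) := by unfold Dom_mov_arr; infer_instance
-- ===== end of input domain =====

-- B replaces A's in-place bubbling with per-column compact-then-merge (one pass), asymptotically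
-- faster; A mutates mat in place and B does not: the equivalence proved is about the RETURN value only.

-- ===== PORT A =====
-- 2-D read/write mat[j][i]; inside Pre_ every access A performs is in range, so getD/set are exact.
def pvG (m : List (List Int)) (j i : Nat) : Int := (m.getD j []).getD i 0
def pvS (m : List (List Int)) (j i : Nat) (v : Int) : List (List Int) :=
  m.set j ((m.getD j []).set i v)

-- sumados[-1] += -1  (Python mutates the last element; guarded by 'k in sumados' so the list is nonempty)
def pvDecLast : List Int → List Int
  | [] => []
  | [x] => [x - 1]
  | x :: xs => x :: pvDecLast xs

-- 'for k in range(j,0,-1)' with break; state (mat, sumados, puntos)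
def pvKloopA (i : Nat) : Nat → List (List Int) × List Int × Int → List (List Int) × List Int × Int
  | 0, st => st
  | (k+1), (m, su, p) =>
    if pvG m (k+1) i = pvG m k i ∧ ((k+1 : Int) ∉ su) ∧ ((k+1 : Int) - 1 ∉ su) then
      let m1 := pvS m k i (pvG m k i + pvG m (k+1) i)
      let m2 := pvS m1 (k+1) i 0
      pvKloopA i k (m2, su ++ [(k+1 : Int) - 1], p + pvG m1 k i)
    else if pvG m k i = 0 then
      let m1 := pvS m k i (pvG m (k+1) i)
      let m2 := pvS m1 (k+1) i 0
      let su' := if (k+1 : Int) ∈ su then pvDecLast su else su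
      pvKloopA i k (m2, su', p)
    else (m, su, p)

def mov_arr (mat : List (List Int)) : Int :=
  let n := mat.length
  ((List.range (mat.headD []).length).foldl
    (fun (st : List (List Int) × Int) i =>
      let r := (List.range' 1 (n - 1)).foldl
        (fun (st2 : List (List Int) × List Int × Int) j =>
          if pvG st2.1 j i = 0 then st2 else pvKloopA i j st2)
        (st.1, ([] : List Int), st.2)
      (r.1, r.2.2))
    (mat, 0)).2

-- ===== PORT B =====
-- 'while t + 1 < len(col): …' accumulating puntos
def pvMergeLoop (col : List Int) (t : Nat) (p : Int) : Int :=
  if t + 1 < col.length then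
    if col.getD t 0 = col.getD (t+1) 0 then pvMergeLoop col (t+2) (p + 2 * col.getD t 0)
    else pvMergeLoop col (t+1) p
  else p
termination_by col.length - t

def mov_arr_alt (mat : List (List Int)) : Int :=
  (List.range (mat.headD []).length).foldl
    (fun (p : Int) i =>
      let col := (mat.map (fun row => row.getD i 0)).filter (fun v => v ≠ 0)
      pvMergeLoop col 0 p)
    0

-- ===== PRECONDITION & SPEC =====
-- A raises IndexError on mat = [] (mat[0]) and whenever some row is shorter than row 0
-- (mat[j][i] with i < len(mat[0])); Pre_ excludes exactly those inputs.
def Pre_mov_arr (mat : List (List Int)) : Prop :=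
  mat ≠ [] ∧ ∀ r ∈ mat, (mat.headD []).length ≤ r.length
instance (mat : List (List Int)) : Decidable (Pre_mov_arr mat) := by unfold Pre_mov_arr; infer_instance

def pvWitness_mov_arr : List (List Int) := [[2, 2], [2, 0], [0, 2], [4, 4]]

def Spec_mov_arr (mat : List (List Int)) (out : Int) : Prop := out = mov_arr_alt mat
instance (mat : List (List Int)) (out : Int) : Decidable (Spec_mov_arr mat out) := by unfold Spec_mov_arr; infer_instance

-- ===== CLAIM (what is proved, stated in full; the proofs are below) =====
def Claim_equal_mov_arr : Prop := ∀ (mat : List (List Int)), Dom_mov_arr mat → Pre_mov_arr mat → Spec_mov_arr mat (mov_arr mat)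


-- ===== LEMMAS AND PROOFS =====

-- column i of the matrix, as A reads it (missing entries read as 0)
def colOf (m : List (List Int)) (i : Nat) : List Int := m.map (fun r => r.getD i 0)

-- A's k-loop replayed on a single column
def cKloop : Nat → List Int × List Int × Int → List Int × List Int × Int
  | 0, st => st
  | (k+1), (c, su, p) =>
    if c.getD (k+1) 0 = c.getD k 0 ∧ ((k+1 : Int) ∉ su) ∧ ((k+1 : Int) - 1 ∉ su) then
      let c1 := c.set k (c.getD k 0 + c.getD (k+1) 0)
      let c2 := c1.set (k+1) 0
      cKloop k (c2, su ++ [(k+1 : Int) - 1], p + c1.getD k 0)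
    else if c.getD k 0 = 0 then
      let c1 := c.set k (c.getD (k+1) 0)
      let c2 := c1.set (k+1) 0
      cKloop k (c2, if (k+1 : Int) ∈ su then pvDecLast su else su, p)
    else (c, su, p)

def cF (st : List Int × List Int × Int) (j : Nat) : List Int × List Int × Int :=
  if st.1.getD j 0 = 0 then st else cKloop j st

-- online 2048 insertion: state (placed tiles, top-is-freshly-merged, points)
def push (st : List Int × Bool × Int) (v : Int) : List Int × Bool × Int :=
  if v = 0 then st
  else if st.1.getLast? = some v ∧ st.2.1 = false then
    (st.1.dropLast ++ [v + v], true, st.2.2 + (v + v))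
  else (st.1 ++ [v], false, st.2.2)

-- what A's 'sumados' list means relative to the online state
def SuOK (su pl : List Int) (lk : Bool) : Prop :=
  (∀ x ∈ su, 0 ≤ x ∧ x < (pl.length : Int)) ∧ (((pl.length : Int) - 1 ∈ su) ↔ lk = true)

-- single-pass adjacent merge (the abstract reading of B's while loop)
def mp : List Int → Int
  | a :: b :: t => if a = b then 2 * a + mp t else mp (b :: t)
  | _ => 0

def Abody (n : Nat) (st : List (List Int) × Int) (i : Nat) : List (List Int) × Int :=
  let r := (List.range' 1 (n - 1)).foldl
    (fun (st2 : List (List Int) × List Int × Int) j =>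
      if pvG st2.1 j i = 0 then st2 else pvKloopA i j st2)
    (st.1, ([] : List Int), st.2)
  (r.1, r.2.2)

def Bbody (mat : List (List Int)) (p : Int) (i : Nat) : Int :=
  let col := (mat.map (fun row => row.getD i 0)).filter (fun v => v ≠ 0)
  pvMergeLoop col 0 p

theorem mov_arr_eq_fold (mat : List (List Int)) :
    mov_arr mat = ((List.range (mat.headD []).length).foldl (Abody mat.length) (mat, 0)).2 := rfl

theorem mov_arr_alt_eq_fold (mat : List (List Int)) :
    mov_arr_alt mat = (List.range (mat.headD []).length).foldl (Bbody mat) 0 := rfl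

theorem pvG_col (m : List (List Int)) (j i : Nat) : pvG m j i = (colOf m i).getD j 0 := by
  simp only [pvG, colOf, List.getD_eq_getElem?_getD, List.getElem?_map]
  cases h : m[j]? with
  | none => simp
  | some r => simp [List.getD_eq_getElem?_getD]

theorem colOf_pvS (m : List (List Int)) (j i : Nat) (v : Int)
    (h : i < (m.getD j []).length) :
    colOf (pvS m j i v) i = (colOf m i).set j v := by
  simp only [colOf, pvS, List.map_set]
  congr 1
  rw [List.getD_eq_getElem?_getD, List.getElem?_set_eq_of_lt _ h]
  rfl

theorem colOf_pvS_ne (m : List (List Int)) (j i i' : Nat) (v : Int) (hne : i' ≠ i) :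
    colOf (pvS m j i v) i' = colOf m i' := by
  apply List.ext_getElem?
  intro k
  simp only [colOf, List.getElem?_map, pvS]
  by_cases hk : j = k
  · subst hk
    rw [List.getElem?_set_self']
    cases h : m[j]? with
    | none => rfl
    | some r =>
      have hset : (r.set i v)[i']? = r[i']? := List.getElem?_set_ne (fun he => hne he.symm)
      simp [h, List.getD_eq_getElem?_getD, hset]
  · rw [List.getElem?_set_ne hk]

theorem pvS_length (m : List (List Int)) (j i : Nat) (v : Int) :
    (pvS m j i v).length = m.length := by
  simp [pvS]

theorem pvS_rows (m : List (List Int)) (j i : Nat) (v : Int) (cols : Nat)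
    (h : ∀ r ∈ m, cols ≤ r.length) : ∀ r ∈ pvS m j i v, cols ≤ r.length := by
  intro r hr
  by_cases hj : j < m.length
  · unfold pvS at hr
    rcases List.mem_or_eq_of_mem_set hr with h' | h'
    · exact h r h'
    · subst h'
      rw [List.length_set]
      have hm : m.getD j [] ∈ m := by
        rw [List.getD_eq_getElem?_getD, List.getElem?_eq_getElem hj]
        exact List.getElem_mem hj
      exact h _ hm
  · unfold pvS at hr
    rw [List.set_eq_of_length_le (Nat.le_of_not_lt hj)] at hr
    exact h r hr

theorem getD_append_len (l1 l2 : List Int) (t : Nat) :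
    (l1 ++ l2).getD (l1.length + t) 0 = l2.getD t 0 := by
  simp [List.getD_eq_getElem?_getD, List.getElem?_append_right]

theorem set_append_len (l1 l2 : List Int) (t : Nat) (x : Int) :
    (l1 ++ l2).set (l1.length + t) x = l1 ++ l2.set t x := by
  simp [List.set_append_right]

theorem getD_mem (m : List (List Int)) (k : Nat) (hk : k < m.length) : m.getD k [] ∈ m := by
  rw [List.getD_eq_getElem?_getD, List.getElem?_eq_getElem hk]
  exact List.getElem_mem hk

-- A's k-loop on the matrix tracks the same loop on column i and leaves other columns alone
theorem KA_corr (i cols : Nat) (hi : i < cols) :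
    ∀ k (m : List (List Int)) (su : List Int) (p : Int),
      (∀ r ∈ m, cols ≤ r.length) → k < m.length →
      ∃ m', pvKloopA i k (m, su, p) = (m', (cKloop k (colOf m i, su, p)).2) ∧
        colOf m' i = (cKloop k (colOf m i, su, p)).1 ∧
        (∀ i', i' ≠ i → colOf m' i' = colOf m i') ∧
        m'.length = m.length ∧ (∀ r ∈ m', cols ≤ r.length) := by
  intro k
  induction k with
  | zero =>
    intro m su p hrows hk
    exact ⟨m, rfl, rfl, fun _ _ => rfl, rfl, hrows⟩
  | succ k ih =>
    intro m su p hrows hk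
    have hkm : k < m.length := by omega
    have hik : i < (m.getD k []).length := lt_of_lt_of_le hi (hrows _ (getD_mem m k hkm))
    rw [pvKloopA, cKloop, pvG_col m (k+1) i, pvG_col m k i]
    by_cases h1 : (colOf m i).getD (k+1) 0 = (colOf m i).getD k 0 ∧
        ((k+1 : Int) ∉ su) ∧ ((k+1 : Int) - 1 ∉ su)
    · rw [if_pos h1, if_pos h1]
      simp only []
      set X := (colOf m i).getD k 0 + (colOf m i).getD (k+1) 0 with hX
      have hcol1 : colOf (pvS m k i X) i = (colOf m i).set k X := colOf_pvS m k i X hik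
      have hik1 : i < ((pvS m k i X).getD (k+1) []).length :=
        lt_of_lt_of_le hi (pvS_rows m k i X cols hrows _
          (getD_mem _ (k+1) (by rw [pvS_length]; omega)))
      have hcol2 : colOf (pvS (pvS m k i X) (k+1) i 0) i
          = (((colOf m i).set k X).set (k+1) 0) := by
        rw [colOf_pvS _ (k+1) i 0 hik1, hcol1]
      have hp : pvG (pvS m k i X) k i = ((colOf m i).set k X).getD k 0 := by
        rw [pvG_col, hcol1]
      rw [hp]
      obtain ⟨m', he, hcol', hother', hlen', hrows'⟩ :=
        ih (pvS (pvS m k i X) (k+1) i 0) (su ++ [(k+1 : Int) - 1])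
          (p + ((colOf m i).set k X).getD k 0)
          (pvS_rows (pvS m k i X) (k+1) i 0 cols (pvS_rows m k i X cols hrows))
          (by rw [pvS_length, pvS_length]; omega)
      rw [hcol2] at he hcol'
      refine ⟨m', he, hcol', ?_, ?_, hrows'⟩
      · intro i' hi'
        rw [hother' i' hi', colOf_pvS_ne _ _ _ _ _ hi', colOf_pvS_ne _ _ _ _ _ hi']
      · rw [hlen', pvS_length, pvS_length]
    · rw [if_neg h1, if_neg h1]
      by_cases h2 : (colOf m i).getD k 0 = 0
      · rw [if_pos h2, if_pos h2]
        simp only []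
        set Y := (colOf m i).getD (k+1) 0 with hY
        have hcol1 : colOf (pvS m k i Y) i = (colOf m i).set k Y := colOf_pvS m k i Y hik
        have hik1 : i < ((pvS m k i Y).getD (k+1) []).length :=
          lt_of_lt_of_le hi (pvS_rows m k i Y cols hrows _
            (getD_mem _ (k+1) (by rw [pvS_length]; omega)))
        have hcol2 : colOf (pvS (pvS m k i Y) (k+1) i 0) i
            = (((colOf m i).set k Y).set (k+1) 0) := by
          rw [colOf_pvS _ (k+1) i 0 hik1, hcol1]
        obtain ⟨m', he, hcol', hother', hlen', hrows'⟩ :=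
          ih (pvS (pvS m k i Y) (k+1) i 0)
            (if (k+1 : Int) ∈ su then pvDecLast su else su) p
            (pvS_rows (pvS m k i Y) (k+1) i 0 cols (pvS_rows m k i Y cols hrows))
            (by rw [pvS_length, pvS_length]; omega)
        rw [hcol2] at he hcol'
        refine ⟨m', he, hcol', ?_, ?_, hrows'⟩
        · intro i' hi'
          rw [hother' i' hi', colOf_pvS_ne _ _ _ _ _ hi', colOf_pvS_ne _ _ _ _ _ hi']
        · rw [hlen', pvS_length, pvS_length]
      · rw [if_neg h2, if_neg h2]
        exact ⟨m, rfl, rfl, fun _ _ => rfl, rfl, hrows⟩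

-- the same for A's whole j-loop
theorem JF_corr (i cols : Nat) (hi : i < cols) :
    ∀ (L : List Nat) (m : List (List Int)) (su : List Int) (p : Int),
      (∀ r ∈ m, cols ≤ r.length) → (∀ j ∈ L, j < m.length) →
      ∃ m', L.foldl (fun st2 j => if pvG st2.1 j i = 0 then st2 else pvKloopA i j st2) (m, su, p)
              = (m', (L.foldl cF (colOf m i, su, p)).2) ∧
        colOf m' i = (L.foldl cF (colOf m i, su, p)).1 ∧
        (∀ i', i' ≠ i → colOf m' i' = colOf m i') ∧
        m'.length = m.length ∧ (∀ r ∈ m', cols ≤ r.length) := by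
  intro L
  induction L with
  | nil =>
    intro m su p hrows _
    exact ⟨m, rfl, rfl, fun _ _ => rfl, rfl, hrows⟩
  | cons j L ih =>
    intro m su p hrows hL
    simp only [List.foldl_cons]
    by_cases h0 : (colOf m i).getD j 0 = 0
    · rw [if_pos (by rw [pvG_col]; exact h0), show cF (colOf m i, su, p) j = (colOf m i, su, p) from by
        unfold cF; rw [if_pos h0]]
      exact ih m su p hrows (fun j' hj' => hL j' (by simp [hj']))
    · rw [if_neg (by rw [pvG_col]; exact h0), show cF (colOf m i, su, p) j = cKloop j (colOf m i, su, p) from by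
        unfold cF; rw [if_neg h0]]
      obtain ⟨m1, he, hcol, hother, hlen, hrows1⟩ :=
        KA_corr i cols hi j m su p hrows (hL j (by simp))
      rw [he]
      obtain ⟨m', he', hcol', hother', hlen', hrows'⟩ :=
        ih m1 (cKloop j (colOf m i, su, p)).2.1 (cKloop j (colOf m i, su, p)).2.2 hrows1
          (fun j' hj' => hlen ▸ hL j' (by simp [hj']))
      have hX : (colOf m1 i, (cKloop j (colOf m i, su, p)).2.1, (cKloop j (colOf m i, su, p)).2.2)
          = cKloop j (colOf m i, su, p) := by rw [hcol]
      rw [hX] at he' hcol'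
      refine ⟨m', he', hcol', ?_, ?_, hrows'⟩
      · intro i' hi'; rw [hother' i' hi', hother i' hi']
      · rw [hlen', hlen]

theorem push_length (st : List Int × Bool × Int) (v : Int) :
    (push st v).1.length ≤ st.1.length + 1 := by
  unfold push
  split_ifs <;> simp [List.length_dropLast] <;> omega

-- one bubbling pass = one online push
theorem cK_push : ∀ (z : Nat) (pl : List Int) (lk : Bool) (su : List Int) (p : Int)
    (rest : List Int) (v : Int), v ≠ 0 → (0 : Int) ∉ pl → SuOK su pl lk →
    ∃ su', cKloop (pl.length + z) (pl ++ List.replicate z 0 ++ v :: rest, su, p)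
        = ((push (pl, lk, p) v).1
            ++ List.replicate (pl.length + 1 + z - (push (pl, lk, p) v).1.length) 0 ++ rest,
           su', (push (pl, lk, p) v).2.2)
      ∧ SuOK su' (push (pl, lk, p) v).1 (push (pl, lk, p) v).2.1
      ∧ (0 : Int) ∉ (push (pl, lk, p) v).1 := by
  intro z
  induction z with
  | zero =>
    intro pl lk su p rest v hv h0 hsu
    obtain ⟨hbound, hlock⟩ := hsu
    rcases List.eq_nil_or_concat pl with hpl | ⟨q, w, hpl⟩
    · subst hpl
      have hsunil : su = [] := by
        rcases su with _ | ⟨x, su'⟩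
        · rfl
        · have hb := hbound x (by simp)
          simp at hb
          omega
      subst hsunil
      have hpush : push (([] : List Int), lk, p) v = ([v], false, p) := by
        simp [push, hv]
      rw [hpush]
      refine ⟨[], by simp [cKloop], ⟨by simp, by simp⟩, by simp; exact fun h => hv h.symm⟩
    · rw [List.concat_eq_append] at hpl
      subst hpl
      have hw : w ≠ 0 := fun h => h0 (by simp [← h])
      have hq0 : (0 : Int) ∉ q := fun h => h0 (by simp [h])
      have hcnt : (q ++ [w]).length + 0 = q.length + 1 := by simp
      have hcform : (q ++ [w]) ++ List.replicate 0 0 ++ v :: rest = q ++ w :: v :: rest := by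
        simp
      rw [hcnt, hcform, cKloop]
      have hgv : (q ++ w :: v :: rest).getD (q.length + 1) 0 = v := by
        have := getD_append_len q (w :: v :: rest) 1
        simpa using this
      have hgw : (q ++ w :: v :: rest).getD q.length 0 = w := by
        have := getD_append_len q (w :: v :: rest) 0
        simpa using this
      have hlenpl : ((q ++ [w]).length : Int) = (q.length : Int) + 1 := by simp
      have hnm1 : ((q.length : Int) + 1) ∉ su := by
        intro hm; have := hbound _ hm; rw [hlenpl] at this; omega
      by_cases hm : v = w ∧ lk = false
      · obtain ⟨hvw, hlkf⟩ := hm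
        have hnm0 : ((q.length : Int)) ∉ su := by
          intro hmem
          have : lk = true := hlock.mp (by rw [hlenpl]; simpa using hmem)
          simp [hlkf] at this
        rw [if_pos ⟨by rw [hgv, hgw, hvw], by push_cast; exact hnm1, by push_cast; simpa using hnm0⟩]
        simp only []
        have hset1 : (q ++ w :: v :: rest).set q.length
            ((q ++ w :: v :: rest).getD q.length 0 + (q ++ w :: v :: rest).getD (q.length + 1) 0)
            = q ++ (w + v) :: v :: rest := by
          rw [hgv, hgw]
          have := set_append_len q (w :: v :: rest) 0 (w + v)
          simpa using this
        rw [hset1]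
        have hset2 : (q ++ (w + v) :: v :: rest).set (q.length + 1) 0
            = q ++ (w + v) :: 0 :: rest := by
          have := set_append_len q ((w + v) :: v :: rest) 1 0
          simpa using this
        rw [hset2]
        have hgwv : (q ++ (w + v) :: v :: rest).getD q.length 0 = w + v := by
          have := getD_append_len q ((w + v) :: v :: rest) 0
          simpa using this
        rw [hgwv]
        set M := ((q.length : Int) + 1 - 1) with hM
        have hpush : push (q ++ [w], lk, p) v = (q ++ [v + v], true, p + (v + v)) := by
          simp only [push, if_neg hv]
          rw [if_pos ⟨by simp [hvw], hlkf⟩, List.dropLast_concat]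
        rw [hpush]
        have hcount : (q ++ [w]).length + 1 + 0 - (q ++ [v + v]).length = 1 := by simp
        rw [hcount, show List.replicate 1 (0 : Int) = [0] from rfl]
        have hwv : w + v = v + v := by rw [hvw]
        rw [hwv]
        have hcoleq : (q ++ [v + v]) ++ [0] ++ rest = q ++ (v + v) :: 0 :: rest := by simp
        rw [hcoleq]
        have hvv0 : v + v ≠ 0 := by intro hc; apply hv; omega
        have hsu' : SuOK (su ++ [M]) (q ++ [v + v]) true := by
          constructor
          · intro x hx
            rcases List.mem_append.mp hx with hx | hx
            · have hb := hbound x hx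
              rw [hlenpl] at hb
              refine ⟨hb.1, ?_⟩
              simp
              omega
            · simp at hx
              refine ⟨by rw [hx, hM]; omega, ?_⟩
              rw [hx, hM]
              simp
              try omega
          · constructor
            · intro _; rfl
            · intro _
              refine List.mem_append_right _ ?_
              simp [hM]
              try omega
        have h0' : (0 : Int) ∉ q ++ [v + v] := by
          intro hc
          rcases List.mem_append.mp hc with hc | hc
          · exact hq0 hc
          · simp at hc; exact hvv0 hc.symm
        have hstop : cKloop q.length (q ++ (v + v) :: 0 :: rest, su ++ [M], p + (v + v))
            = (q ++ (v + v) :: 0 :: rest, su ++ [M], p + (v + v)) := by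
          rcases List.eq_nil_or_concat q with hq | ⟨q', u, hq⟩
          · subst hq
            rfl
          · rw [List.concat_eq_append] at hq
            subst hq
            have hu : u ≠ 0 := fun h => hq0 (by simp [← h])
            have hc2 : (q' ++ [u]).length = q'.length + 1 := by simp
            have hcf : (q' ++ [u]) ++ (v + v) :: 0 :: rest = q' ++ u :: (v + v) :: 0 :: rest := by
              simp
            rw [hcf] at *
            rw [hc2, cKloop]
            have hMmem : ((q'.length : Int) + 1) ∈ su ++ [M] := by
              refine List.mem_append_right _ ?_
              simp [hM]
              try omega
            rw [if_neg (fun hc => hc.2.1 (by push_cast; exact hMmem))]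
            have hgu : (q' ++ u :: (v + v) :: 0 :: rest).getD q'.length 0 = u := by
              have := getD_append_len q' (u :: (v + v) :: 0 :: rest) 0
              simpa using this
            rw [if_neg (by rw [hgu]; exact hu)]
        exact ⟨su ++ [M], hstop, hsu', h0'⟩
      · -- no merge: the loop breaks at the top of the placed block
        rw [if_neg ?hbr]
        case hbr =>
          intro hc
          obtain ⟨hc1, hc2, hc3⟩ := hc
          rw [hgv, hgw] at hc1
          rcases Decidable.em (lk = false) with hlkf | hlkt
          · exact hm ⟨hc1, hlkf⟩
          · have hlk : lk = true := by revert hlkt; cases lk <;> simp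
            have hmemq : ((q.length : Int)) ∈ su := by
              have := hlock.mpr hlk
              rw [hlenpl] at this
              simpa using this
            apply hc3
            have : ((q.length : Nat) + 1 : Int) - 1 = (q.length : Int) := by push_cast; omega
            push_cast
            simpa using hmemq
        rw [if_neg (by rw [hgw]; exact hw)]
        have hpush : push (q ++ [w], lk, p) v = ((q ++ [w]) ++ [v], false, p) := by
          simp only [push, if_neg hv]
          rw [if_neg]
          intro hc
          rw [List.getLast?_concat] at hc
          exact hm ⟨(Option.some_inj.mp hc.1).symm, hc.2⟩
        rw [hpush]
        have hcount : (q ++ [w]).length + 1 + 0 - ((q ++ [w]) ++ [v]).length = 0 := by simp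
        rw [hcount, show List.replicate 0 (0 : Int) = [] from rfl]
        have hcoleq : ((q ++ [w]) ++ [v]) ++ [] ++ rest = q ++ w :: v :: rest := by simp
        rw [hcoleq]
        refine ⟨su, rfl, ?_, ?_⟩
        · constructor
          · intro x hx
            have hb := hbound x hx
            rw [hlenpl] at hb
            refine ⟨hb.1, ?_⟩
            simp
            omega
          · constructor
            · intro hmem
              exfalso
              apply hnm1
              have : (((q ++ [w]) ++ [v]).length : Int) - 1 = (q.length : Int) + 1 := by
                simp
                push_cast
                omega
              rw [this] at hmem
              exact hmem
            · intro h; cases h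
        · intro hc
          rcases List.mem_append.mp hc with hc | hc
          · exact h0 hc
          · simp at hc; exact hv hc.symm
  | succ z ihz =>
    intro pl lk su p rest v hv h0 hsu
    obtain ⟨hbound, hlock⟩ := hsu
    have hcform : pl ++ List.replicate (z+1) 0 ++ v :: rest
        = (pl ++ List.replicate z 0) ++ 0 :: v :: rest := by
      rw [List.replicate_succ']
      simp
    have hcnt : pl.length + (z + 1) = (pl.length + z) + 1 := rfl
    rw [hcnt, hcform, cKloop]
    have hlen1 : (pl ++ List.replicate z 0).length = pl.length + z := by simp
    have hgv : ((pl ++ List.replicate z 0) ++ 0 :: v :: rest).getD (pl.length + z + 1) 0 = v := by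
      have := getD_append_len (pl ++ List.replicate z 0) (0 :: v :: rest) 1
      rw [hlen1] at this
      simpa using this
    have hg0 : ((pl ++ List.replicate z 0) ++ 0 :: v :: rest).getD (pl.length + z) 0 = 0 := by
      have := getD_append_len (pl ++ List.replicate z 0) (0 :: v :: rest) 0
      rw [hlen1] at this
      simpa using this
    rw [if_neg (fun hc => hv (by rw [hgv, hg0] at hc; exact hc.1))]
    rw [if_pos hg0]
    have hnm : ((pl.length + z : Nat) + 1 : Int) ∉ su := by
      intro hmem
      have := hbound _ hmem
      push_cast at this
      omega
    rw [if_neg (by push_cast; exact hnm)]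
    simp only []
    have hset1 : ((pl ++ List.replicate z 0) ++ 0 :: v :: rest).set (pl.length + z)
        (((pl ++ List.replicate z 0) ++ 0 :: v :: rest).getD (pl.length + z + 1) 0)
        = (pl ++ List.replicate z 0) ++ v :: v :: rest := by
      rw [hgv]
      have := set_append_len (pl ++ List.replicate z 0) (0 :: v :: rest) 0 v
      rw [hlen1] at this
      simpa using this
    rw [hset1]
    have hset2 : ((pl ++ List.replicate z 0) ++ v :: v :: rest).set (pl.length + z + 1) 0
        = (pl ++ List.replicate z 0) ++ v :: 0 :: rest := by
      have := set_append_len (pl ++ List.replicate z 0) (v :: v :: rest) 1 0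
      rw [hlen1] at this
      simpa using this
    rw [hset2]
    obtain ⟨su', heq, hsuok, h0'⟩ := ihz pl lk su p (0 :: rest) v hv h0 ⟨hbound, hlock⟩
    refine ⟨su', heq.trans ?_, hsuok, h0'⟩
    have hle : (push (pl, lk, p) v).1.length ≤ pl.length + 1 := push_length _ _
    have hrep : List.replicate (pl.length + 1 + z - (push (pl, lk, p) v).1.length) 0 ++ 0 :: rest
        = List.replicate (pl.length + 1 + (z + 1) - (push (pl, lk, p) v).1.length) 0 ++ rest := by
      have harith : pl.length + 1 + (z + 1) - (push (pl, lk, p) v).1.length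
          = (pl.length + 1 + z - (push (pl, lk, p) v).1.length) + 1 := by omega
      rw [harith, List.replicate_succ']
      simp
    simp only [List.append_assoc]
    rw [hrep]

-- the whole j-loop on a column = folding push over the remaining entries
theorem cJ_inv : ∀ (todo pl su : List Int) (p : Int) (lk : Bool) (z : Nat),
    (0 : Int) ∉ pl → SuOK su pl lk →
    ((List.range' (pl.length + z) todo.length).foldl cF
        (pl ++ List.replicate z 0 ++ todo, su, p)).2.2
      = (todo.foldl push (pl, lk, p)).2.2 := by
  intro todo
  induction todo with
  | nil => intro pl su p lk z h0 hsu; rfl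
  | cons v t ih =>
    intro pl su p lk z h0 hsu
    rw [show (v :: t).length = t.length + 1 from rfl, List.range'_succ]
    simp only [List.foldl_cons]
    have hlen : (pl ++ List.replicate z 0).length = pl.length + z := by simp
    have hgv : (pl ++ List.replicate z 0 ++ v :: t).getD (pl.length + z) 0 = v := by
      have := getD_append_len (pl ++ List.replicate z 0) (v :: t) 0
      rw [hlen] at this
      simpa using this
    by_cases hv : v = 0
    · rw [show cF (pl ++ List.replicate z 0 ++ v :: t, su, p) (pl.length + z)
          = (pl ++ List.replicate z 0 ++ v :: t, su, p) from by
        unfold cF; rw [if_pos (by rw [hgv, hv])]]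
      rw [show push (pl, lk, p) v = (pl, lk, p) from by simp [push, hv]]
      have hcol : pl ++ List.replicate z 0 ++ v :: t
          = pl ++ List.replicate (z + 1) 0 ++ t := by
        rw [List.replicate_succ']
        simp [hv]
      rw [hcol]
      exact ih pl su p lk (z + 1) h0 hsu
    · rw [show cF (pl ++ List.replicate z 0 ++ v :: t, su, p) (pl.length + z)
          = cKloop (pl.length + z) (pl ++ List.replicate z 0 ++ v :: t, su, p) from by
        unfold cF; rw [if_neg (by rw [hgv]; exact hv)]]
      obtain ⟨su', heq, hsuok, h0'⟩ := cK_push z pl lk su p t v hv h0 hsu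
      rw [heq]
      have hn : (push (pl, lk, p) v).1.length ≤ pl.length + 1 := push_length (pl, lk, p) v
      have harith : pl.length + z + 1
          = (push (pl, lk, p) v).1.length + (pl.length + 1 + z - (push (pl, lk, p) v).1.length) := by
        omega
      rw [harith]
      exact ih (push (pl, lk, p) v).1 su' (push (pl, lk, p) v).2.2 (push (pl, lk, p) v).2.1
        (pl.length + 1 + z - (push (pl, lk, p) v).1.length) h0' hsuok

theorem mergeLoop_drop : ∀ (col : List Int) (t : Nat) (p : Int),
    pvMergeLoop col t p = p + mp (col.drop t) := by
  intro col
  suffices H : ∀ (fuel t : Nat) (p : Int), col.length - t ≤ fuel →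
      pvMergeLoop col t p = p + mp (col.drop t) by
    intro t p; exact H col.length t p (by omega)
  intro fuel
  induction fuel with
  | zero =>
    intro t p h
    rw [pvMergeLoop, if_neg (by omega)]
    have hd : col.drop t = [] := List.drop_eq_nil_of_le (by omega)
    simp [hd, mp]
  | succ fuel ih =>
    intro t p h
    rw [pvMergeLoop]
    by_cases hlt : t + 1 < col.length
    · have ht : t < col.length := by omega
      have hd : col.drop t = col.getD t 0 :: col.getD (t+1) 0 :: col.drop (t+2) := by
        rw [List.getD_eq_getElem?_getD, List.getElem?_eq_getElem ht,
            List.getD_eq_getElem?_getD, List.getElem?_eq_getElem hlt]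
        rw [← List.getElem_cons_drop ht, ← List.getElem_cons_drop hlt]
        rfl
      have hd1 : col.drop (t+1) = col.getD (t+1) 0 :: col.drop (t+2) := by
        rw [List.getD_eq_getElem?_getD, List.getElem?_eq_getElem hlt]
        rw [← List.getElem_cons_drop hlt]
        rfl
      rw [if_pos hlt]
      by_cases heq : col.getD t 0 = col.getD (t+1) 0
      · rw [if_pos heq, ih (t+2) _ (by omega), hd, mp, if_pos heq]
        ring
      · rw [if_neg heq, ih (t+1) _ (by omega), hd, hd1, mp, if_neg heq]
    · rw [if_neg hlt]
      have hlen : (col.drop t).length ≤ 1 := by rw [List.length_drop]; omega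
      rcases hdt : col.drop t with _ | ⟨x, _ | ⟨y, tl⟩⟩
      · simp [mp]
      · simp [mp]
      · rw [hdt] at hlen; simp at hlen

theorem foldl_push_filter : ∀ (l : List Int) (st : List Int × Bool × Int),
    List.foldl push st l = List.foldl push st (l.filter (fun v => v ≠ 0)) := by
  intro l
  induction l with
  | nil => intro st; rfl
  | cons v t ih =>
    intro st
    by_cases hv : v = 0
    · subst hv
      simp only [List.foldl_cons, List.filter_cons]
      rw [show push st 0 = st from by simp [push]]
      rw [if_neg (by simp)]
      exact ih _
    · simp only [List.foldl_cons, List.filter_cons]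
      rw [if_pos (by simp [hv])]
      simp only [List.foldl_cons]
      exact ih _

theorem foldl_push_last : ∀ (l pl1 pl2 : List Int) (p1 p2 : Int) (lk : Bool),
    pl1.getLast? = pl2.getLast? →
    (List.foldl push (pl1, lk, p1) l).2.2 - p1 = (List.foldl push (pl2, lk, p2) l).2.2 - p2 := by
  intro l
  induction l with
  | nil => intro pl1 pl2 p1 p2 lk h; simp
  | cons v t ih =>
    intro pl1 pl2 p1 p2 lk h
    by_cases hv : v = 0
    · subst hv
      simp only [List.foldl_cons]
      rw [show push (pl1, lk, p1) 0 = (pl1, lk, p1) from by simp [push],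
          show push (pl2, lk, p2) 0 = (pl2, lk, p2) from by simp [push]]
      exact ih pl1 pl2 p1 p2 lk h
    · simp only [List.foldl_cons]
      by_cases hc : pl2.getLast? = some v ∧ lk = false
      · rw [show push (pl1, lk, p1) v = (pl1.dropLast ++ [v + v], true, p1 + (v + v)) from by
            simp only [push, if_neg hv]; rw [if_pos (h ▸ hc)],
          show push (pl2, lk, p2) v = (pl2.dropLast ++ [v + v], true, p2 + (v + v)) from by
            simp only [push, if_neg hv]; rw [if_pos hc]]
        have hl : (pl1.dropLast ++ [v + v]).getLast? = (pl2.dropLast ++ [v + v]).getLast? := by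
          simp [List.getLast?_concat]
        have := ih _ _ (p1 + (v + v)) (p2 + (v + v)) true hl
        omega
      · rw [show push (pl1, lk, p1) v = (pl1 ++ [v], false, p1) from by
            simp only [push, if_neg hv]; rw [if_neg (h ▸ hc)],
          show push (pl2, lk, p2) v = (pl2 ++ [v], false, p2) from by
            simp only [push, if_neg hv]; rw [if_neg hc]]
        exact ih _ _ p1 p2 false (by simp [List.getLast?_concat])

theorem locked_reset : ∀ (l pl : List Int) (p : Int),
    (List.foldl push (pl, true, p) l).2.2
      = p + (List.foldl push (([] : List Int), false, (0 : Int)) l).2.2 := by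
  intro l
  induction l with
  | nil => intro pl p; simp
  | cons v t ih =>
    intro pl p
    by_cases hv : v = 0
    · subst hv
      simp only [List.foldl_cons]
      rw [show push (pl, true, p) 0 = (pl, true, p) from by simp [push],
          show push (([] : List Int), false, (0:Int)) 0 = ([], false, 0) from by simp [push]]
      exact ih pl p
    · simp only [List.foldl_cons]
      rw [show push (pl, true, p) v = (pl ++ [v], false, p) from by
            simp [push, hv],
          show push (([] : List Int), false, (0:Int)) v = ([v], false, 0) from by
            simp [push, hv]]
      have := foldl_push_last t (pl ++ [v]) [v] p 0 false (by simp [List.getLast?_concat])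
      omega

theorem mp_eq_P0 : ∀ (l : List Int), (∀ x ∈ l, x ≠ 0) →
    mp l = (List.foldl push (([] : List Int), false, (0 : Int)) l).2.2
  | [], _ => by simp [mp]
  | [a], h => by
    have ha : a ≠ 0 := h a (by simp)
    simp [mp, push, ha]
  | a :: b :: t, h => by
    have ha : a ≠ 0 := h a (by simp)
    have hb : b ≠ 0 := h b (by simp)
    have ht : ∀ x ∈ t, x ≠ 0 := fun x hx => h x (by simp [hx])
    simp only [List.foldl_cons]
    rw [show push (([] : List Int), false, (0:Int)) a = ([a], false, 0) from by simp [push, ha]]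
    by_cases hab : a = b
    · rw [mp, if_pos hab]
      rw [show push ([a], false, (0:Int)) b = ([b + b], true, 0 + (b + b)) from by
        simp [push, hb, hab]]
      rw [locked_reset t [b + b] (0 + (b + b)), mp_eq_P0 t ht, hab]
      ring
    · rw [mp, if_neg hab]
      rw [show push ([a], false, (0:Int)) b = ([a, b], false, 0) from by
        simp [push, hb, List.getLast?]
        exact hab]
      have key := foldl_push_last t [a, b] [b] 0 0 false (by simp [List.getLast?])
      have hrec := mp_eq_P0 (b :: t) (fun x hx => h x (by simp at hx; rcases hx with h1|h1 <;> simp [h1]))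
      simp only [List.foldl_cons] at hrec
      rw [show push (([] : List Int), false, (0:Int)) b = ([b], false, 0) from by simp [push, hb]] at hrec
      omega
termination_by l _ => l.length

-- per column: A's j-loop points = B's merge-loop points
theorem col_points (c : List Int) (p : Int) (hc : c ≠ []) :
    ((List.range' 1 (c.length - 1)).foldl cF (c, ([] : List Int), p)).2.2
      = pvMergeLoop (c.filter (fun v => v ≠ 0)) 0 p := by
  obtain ⟨c0, t, rfl⟩ := List.exists_cons_of_ne_nil hc
  rw [mergeLoop_drop, List.drop_zero]
  have hfileq : ∀ (l : List Int) (st : List Int × Bool × Int),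
      List.foldl push st l = List.foldl push st (l.filter (fun v => v ≠ 0)) := foldl_push_filter
  have hlen : (c0 :: t).length - 1 = t.length := by simp
  rw [hlen]
  by_cases h0 : c0 = 0
  · subst h0
    have hstart := cJ_inv t [] [] p false 1 (by simp) ⟨by simp, by simp⟩
    have hfil : (0 :: t).filter (fun v => v ≠ 0) = t.filter (fun v => v ≠ 0) := by
      simp [List.filter_cons]
    rw [hfil]
    refine hstart.trans ?_
    rw [hfileq t ([], false, p)]
    have hoff := foldl_push_last (t.filter (fun v => v ≠ 0)) [] [] p 0 false rfl
    have hmp := mp_eq_P0 (t.filter (fun v => v ≠ 0)) (by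
      intro x hx
      have := List.of_mem_filter hx
      simpa using this)
    rw [hmp]
    omega
  · have hstart := cJ_inv t [c0] [] p false 0 (by simp; exact fun h => h0 h.symm)
      ⟨by simp, by simp⟩
    refine hstart.trans ?_
    have hfil : (c0 :: t).filter (fun v => v ≠ 0) = c0 :: t.filter (fun v => v ≠ 0) := by
      simp [List.filter_cons, h0]
    rw [hfil]
    have hmp := mp_eq_P0 (c0 :: t.filter (fun v => v ≠ 0)) (by
      intro x hx
      simp at hx
      rcases hx with hx | hx
      · rw [hx]; exact h0
      · exact hx.2)
    rw [hmp]
    simp only [List.foldl_cons]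
    rw [show push (([] : List Int), false, (0 : Int)) c0 = ([c0], false, 0) from by
      simp [push, h0]]
    rw [hfileq t ([c0], false, p)]
    have hoff := foldl_push_last (t.filter (fun v => v ≠ 0)) [c0] [c0] p 0 false rfl
    omega

theorem Bfold_congr (m m' : List (List Int)) :
    ∀ (L : List Nat), (∀ i ∈ L, colOf m' i = colOf m i) →
      ∀ (p : Int), L.foldl (Bbody m') p = L.foldl (Bbody m) p := by
  intro L
  induction L with
  | nil => intro _ p; rfl
  | cons i L ih =>
    intro h p
    simp only [List.foldl_cons]
    rw [show Bbody m' p i = Bbody m p i from by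
      unfold Bbody
      have hc : m'.map (fun row => row.getD i 0) = m.map (fun row => row.getD i 0) :=
        h i (by simp)
      rw [hc]]
    exact ih (fun i' hi' => h i' (by simp [hi'])) _

theorem outer_corr (n : Nat) :
    ∀ (L : List Nat) (m : List (List Int)) (p : Int) (cols : Nat),
      m.length = n → n ≠ 0 → (∀ r ∈ m, cols ≤ r.length) → (∀ i ∈ L, i < cols) → L.Nodup →
      (L.foldl (Abody n) (m, p)).2 = L.foldl (Bbody m) p := by
  intro L
  induction L with
  | nil => intro m p cols hmn hn0 hrows hL hnd; rfl
  | cons i L ih =>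
    intro m p cols hmn hn0 hrows hL hnd
    simp only [List.foldl_cons]
    have hi : i < cols := hL i (by simp)
    obtain ⟨m', he, hcol', hother', hlen', hrows'⟩ :=
      JF_corr i cols hi (List.range' 1 (n - 1)) m [] p hrows (by
        intro j hj
        have hj' := List.mem_range'_1.mp hj
        rw [hmn]
        omega)
    rw [show Abody n (m, p) i = (m', ((List.range' 1 (n - 1)).foldl cF (colOf m i, [], p)).2.2)
        from by unfold Abody; rw [he]]
    have hclen : (colOf m i).length = n := by simp [colOf, hmn]
    have hcp := col_points (colOf m i) p (by
      intro hnil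
      apply hn0
      rw [← hclen, hnil]
      rfl)
    rw [hclen] at hcp
    rw [hcp]
    rw [show pvMergeLoop ((colOf m i).filter (fun v => v ≠ 0)) 0 p = Bbody m p i from rfl]
    have hLm : ∀ i' ∈ L, colOf m' i' = colOf m i' := by
      intro i' hi'
      exact hother' i' (fun hieq => (List.nodup_cons.mp hnd).1 (hieq ▸ hi'))
    refine (ih m' (Bbody m p i) cols (by rw [hlen', hmn]) hn0 hrows'
      (fun i' hi' => hL i' (by simp [hi'])) (List.nodup_cons.mp hnd).2).trans ?_
    exact Bfold_congr m m' L hLm (Bbody m p i)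

-- ===== VERDICT (by name: the statement is the Claim_ definition above) =====
theorem mov_arr_spec : Claim_equal_mov_arr := by
  intro mat _ hpre
  obtain ⟨hne, hrows⟩ := hpre
  unfold Spec_mov_arr
  rw [mov_arr_eq_fold, mov_arr_alt_eq_fold]
  exact outer_corr mat.length (List.range (mat.headD []).length) mat 0
    (mat.headD []).length rfl (by simpa [List.length_eq_zero_iff] using hne) hrows
    (fun i hi => List.mem_range.mp hi) List.nodup_range
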